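-- pv_equiv track=rewrite | github.com/lynever/prac_programmars | 프로그래머스/unrated/181890. 왼쪽 오른쪽/왼쪽 오른쪽.py | solution
-- ===== SOURCE A (Python) =====
-- def solution(str_list):
--     answer = []
--     for idx, val in enumerate(str_list):
--         if val == 'l':
--             return str_list[:idx]
--         elif val == 'r':
--             return str_list[idx + 1:]
--     return answer
-- ===== SOURCE B (Python) =====
-- def solution(str_list):
--     n = len(str_list)
--     i_l = str_list.index('l') if 'l' in str_list else n
--     i_r = str_list.index('r') if 'r' in str_list else n
--     if i_l == n and i_r == n:
--         return []
--     if i_l < i_r: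
--         return str_list[:i_l]
--     return str_list[i_r + 1:]
-- ===== Notes on version B (the rewrite author's own statement) =====
-- stated objective: alternative
-- what changed: A's single fused scan with in-loop early returns is replaced by locating the first 'l' and first 'r' independently (membership + index with length as absent-sentinel) and then deciding by comparing the two positions.
import Mathlib
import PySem

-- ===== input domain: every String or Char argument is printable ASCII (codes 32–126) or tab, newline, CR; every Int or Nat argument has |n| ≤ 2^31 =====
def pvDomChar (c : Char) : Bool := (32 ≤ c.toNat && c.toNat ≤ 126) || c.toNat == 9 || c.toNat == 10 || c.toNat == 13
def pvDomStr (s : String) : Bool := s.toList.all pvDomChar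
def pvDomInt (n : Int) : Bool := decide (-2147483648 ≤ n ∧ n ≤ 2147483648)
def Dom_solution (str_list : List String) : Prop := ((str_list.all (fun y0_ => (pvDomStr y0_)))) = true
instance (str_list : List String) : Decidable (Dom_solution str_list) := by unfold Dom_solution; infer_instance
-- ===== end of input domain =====

-- B replaces A's fused scan-with-early-returns by locating the first 'l' and first 'r'
-- independently and comparing the two positions (objective: alternative decomposition).

-- ===== PORT A =====
-- the enumerate loop of A: idx is the enumeration counter, the third argument the suffix still to scan
def solutionGo (str_list : List String) (idx : Int) : List String → List String
  | [] => []
  | val :: rest =>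
    if val = "l" then PySem.List.slice str_list none (some idx)
    else if val = "r" then PySem.List.slice str_list (some (idx + 1)) none
    else solutionGo str_list (idx + 1) rest

def solution (str_list : List String) : List String :=
  solutionGo str_list 0 str_list

-- ===== PORT B =====
def solution_alt (str_list : List String) : List String :=
  let n : Int := str_list.length
  let i_l : Int := if "l" ∈ str_list then ((PySem.List.index? str_list "l").getD 0 : Nat) else n
  let i_r : Int := if "r" ∈ str_list then ((PySem.List.index? str_list "r").getD 0 : Nat) else n
  if i_l = n ∧ i_r = n then []
  else if i_l < i_r then PySem.List.slice str_list none (some i_l)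
  else PySem.List.slice str_list (some (i_r + 1)) none

-- ===== PRECONDITION & SPEC =====
def Spec_solution (str_list : List String) (out : List String) : Prop := out = solution_alt str_list
instance (str_list : List String) (out : List String) : Decidable (Spec_solution str_list out) := by unfold Spec_solution; infer_instance

-- ===== CLAIM (what is proved, stated in full; the proofs are below) =====
def Claim_equal_solution : Prop := ∀ (str_list : List String), Dom_solution str_list → Spec_solution str_list (solution str_list)

-- ===== LEMMAS AND PROOFS =====

-- closed form of A's loop in terms of the first positions of "l" and "r" in the remaining suffix
lemma solutionGo_eq (suf : List String) : ∀ (pre : List String),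
    solutionGo (pre ++ suf) (pre.length : Int) suf =
      (if suf.idxOf "l" = suf.length ∧ suf.idxOf "r" = suf.length then []
       else if suf.idxOf "l" < suf.idxOf "r" then pre ++ suf.take (suf.idxOf "l")
       else suf.drop (suf.idxOf "r" + 1)) := by
  induction suf with
  | nil => intro pre; simp [solutionGo]
  | cons v rest ih =>
    intro pre
    by_cases hl : v = "l"
    · subst hl
      have h1 : List.idxOf "l" ("l" :: rest) = 0 := by simp
      have h2 : List.idxOf "r" ("l" :: rest) = List.idxOf "r" rest + 1 := by
        simp
      simp [solutionGo, h1, h2, PySem.List.slice_to_natCast]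
    · by_cases hr : v = "r"
      · subst hr
        have h1 : List.idxOf "r" ("r" :: rest) = 0 := by simp
        have h2 : List.idxOf "l" ("r" :: rest) = List.idxOf "l" rest + 1 := by
          simp [hl]
        have hsl : PySem.List.slice (pre ++ "r" :: rest) (some ((pre.length : Int) + 1)) none = rest := by
          rw [show ((pre.length : Int) + 1) = ((pre.length + 1 : Nat) : Int) by push_cast; ring,
            PySem.List.slice_from_natCast]
          simp
        simp [solutionGo, hl, h1, h2, hsl]
      · have h1 : List.idxOf "l" (v :: rest) = List.idxOf "l" rest + 1 := by
          simp [hl]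
        have h2 : List.idxOf "r" (v :: rest) = List.idxOf "r" rest + 1 := by
          simp [hr]
        have ih' := ih (pre ++ [v])
        simp only [List.append_assoc, List.cons_append, List.nil_append,
          List.length_append, List.length_cons, List.length_nil] at ih'
        have hc0 : ((pre.length + (0 + 1) : Nat) : Int) = (pre.length : Int) + 1 := by
          push_cast; ring
        rw [hc0] at ih'
        have hstep : solutionGo (pre ++ v :: rest) ((pre.length : Int)) (v :: rest)
            = solutionGo (pre ++ v :: rest) ((pre.length : Int) + 1) rest := by
          simp [solutionGo, hl, hr]
        rw [hstep, ih']
        simp only [h1, h2, List.length_cons]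
        by_cases hnone : rest.idxOf "l" = rest.length ∧ rest.idxOf "r" = rest.length
        · have hc1 : rest.idxOf "l" + 1 = rest.length + 1 ∧ rest.idxOf "r" + 1 = rest.length + 1 := by omega
          simp only [if_pos hnone, if_pos hc1]
        · have hc1 : ¬ (rest.idxOf "l" + 1 = rest.length + 1 ∧ rest.idxOf "r" + 1 = rest.length + 1) := by omega
          simp only [if_neg hnone, if_neg hc1]
          by_cases hlt : rest.idxOf "l" < rest.idxOf "r"
          · have hlt' : rest.idxOf "l" + 1 < rest.idxOf "r" + 1 := by omega
            simp [hlt, hlt']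
          · have hlt' : ¬ rest.idxOf "l" + 1 < rest.idxOf "r" + 1 := by omega
            simp [hlt, hlt']

-- B's positions are exactly List.idxOf (length as the absent-sentinel)
lemma pos_eq_idxOf (L : List String) (m : String) :
    (if m ∈ L then (((PySem.List.index? L m).getD 0 : Nat) : Int) else ((L.length : Nat) : Int))
      = ((L.idxOf m : Nat) : Int) := by
  by_cases hm : m ∈ L
  · have hg : (PySem.List.index? L m).getD 0 = L.idxOf m := by
      rw [PySem.List.index?_eq_idxOf?]
      cases hq : L.idxOf? m with
      | none => exact absurd (List.idxOf?_eq_none_iff.mp hq) (by simp [hm])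
      | some k => have h2 := List.idxOf_eq_getD_idxOf? m L; rw [hq] at h2; simp [h2]
    rw [if_pos hm, hg]
  · rw [if_neg hm, List.idxOf_eq_length hm]

-- ===== VERDICT (by name: the statement is the Claim_ definition above) =====
theorem solution_spec : Claim_equal_solution := by
  intro L _
  unfold Spec_solution solution solution_alt
  dsimp only
  have h := solutionGo_eq L []
  simp only [List.nil_append, List.length_nil, Int.natCast_zero] at h
  rw [h, pos_eq_idxOf L "l", pos_eq_idxOf L "r"]
  by_cases hnone : L.idxOf "l" = L.length ∧ L.idxOf "r" = L.length
  · have hc : ((L.idxOf "l" : Nat) : Int) = (L.length : Int) ∧ ((L.idxOf "r" : Nat) : Int) = (L.length : Int) := by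
      exact ⟨by exact_mod_cast hnone.1, by exact_mod_cast hnone.2⟩
    rw [if_pos hnone, if_pos hc]
  · have hc : ¬ (((L.idxOf "l" : Nat) : Int) = (L.length : Int) ∧ ((L.idxOf "r" : Nat) : Int) = (L.length : Int)) := by
      omega
    rw [if_neg hnone, if_neg hc]
    by_cases hlt : L.idxOf "l" < L.idxOf "r"
    · have hlt' : ((L.idxOf "l" : Nat) : Int) < ((L.idxOf "r" : Nat) : Int) := by exact_mod_cast hlt
      rw [if_pos hlt, if_pos hlt', PySem.List.slice_to_natCast]
    · have hlt' : ¬ ((L.idxOf "l" : Nat) : Int) < ((L.idxOf "r" : Nat) : Int) := by exact_mod_cast hlt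
      rw [if_neg hlt, if_neg hlt',
        show ((L.idxOf "r" : Nat) : Int) + 1 = ((L.idxOf "r" + 1 : Nat) : Int) by omega,
        PySem.List.slice_from_natCast]
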